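-- pv_equiv track=rewrite | github.com/bigbulgogiburger/DHelix-Code | scripts/chafa-to-tsx.py | cells_to_segments
-- ===== SOURCE A (Python) =====
-- def rgb_to_hex(rgb):
--     if rgb is None:
--         return None
--     r, g, b = rgb
--     return f"#{r:02X}{g:02X}{b:02X}"
--
-- def is_dark(rgb):
--     if rgb is None:
--         return True
--     return sum(rgb) < 40
--
-- def cells_to_segments(cells):
--     """Group consecutive cells with same colors into segments."""
--     if not cells:
--         return []
--
--     # Strip trailing dark/empty characters
--     while cells and cells[-1][0] == " " and is_dark(cells[-1][1]) and is_dark(cells[-1][2]):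
--         cells.pop()
--
--     segments = []
--     cur_text = ""
--     cur_fg = None
--     cur_bg = None
--
--     for ch, fg, bg in cells:
--         fg_hex = rgb_to_hex(fg) if fg and sum(fg) >= 40 else None
--         bg_hex = rgb_to_hex(bg) if bg and sum(bg) >= 40 else None
--
--         if fg_hex == cur_fg and bg_hex == cur_bg:
--             cur_text += ch
--         else:
--             if cur_text:
--                 segments.append((cur_text, cur_fg, cur_bg))
--             cur_text = ch
--             cur_fg = fg_hex
--             cur_bg = bg_hex
--
--     if cur_text:
--         segments.append((cur_text, cur_fg, cur_bg))
--
--     return segments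
-- ===== SOURCE B (Python) =====
-- def rgb_to_hex(rgb):
--     if rgb is None:
--         return None
--     r, g, b = rgb
--     return f"#{r:02X}{g:02X}{b:02X}"
--
-- def is_dark(rgb):
--     if rgb is None:
--         return True
--     return sum(rgb) < 40
--
-- def cells_to_segments(cells):
--     """Group consecutive cells with same colors into segments."""
--     # Strip trailing dark/empty characters (mutates the argument, like the original)
--     while cells and cells[-1][0] == " " and is_dark(cells[-1][1]) and is_dark(cells[-1][2]):
--         cells.pop()
--
--     # Build the segment list back-to-front: walk the cells from the right,
--     # merging each cell into the segment built just before it when the colors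
--     # match.  `rev` holds the segments in reverse order; rev[-1] is the segment
--     # the current cell is adjacent to.
--     rev = []
--     for ch, fg, bg in reversed(cells):
--         k = (rgb_to_hex(fg) if fg and sum(fg) >= 40 else None,
--              rgb_to_hex(bg) if bg and sum(bg) >= 40 else None)
--         if rev and (rev[-1][1], rev[-1][2]) == k:
--             rev[-1] = (ch + rev[-1][0], k[0], k[1])
--         else:
--             rev.append((ch, k[0], k[1]))
--
--     # Staged pass: restore order and drop empty-text segments.
--     return [s for s in reversed(rev) if s[0]]
-- ===== Notes on version B (the rewrite author's own statement) =====
-- stated objective: alternative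
-- what changed: Instead of A's forward state machine carrying cur_text/cur_fg/cur_bg with an explicit flush after the loop, B builds the segment list back-to-front: it walks the cells in reverse merging each cell into the adjacent segment of the growing output list itself, then a separate staged pass restores order and filters out empty-text segments; the trailing-strip pop loop is kept so the argument mutation is identical.
import Mathlib
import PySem

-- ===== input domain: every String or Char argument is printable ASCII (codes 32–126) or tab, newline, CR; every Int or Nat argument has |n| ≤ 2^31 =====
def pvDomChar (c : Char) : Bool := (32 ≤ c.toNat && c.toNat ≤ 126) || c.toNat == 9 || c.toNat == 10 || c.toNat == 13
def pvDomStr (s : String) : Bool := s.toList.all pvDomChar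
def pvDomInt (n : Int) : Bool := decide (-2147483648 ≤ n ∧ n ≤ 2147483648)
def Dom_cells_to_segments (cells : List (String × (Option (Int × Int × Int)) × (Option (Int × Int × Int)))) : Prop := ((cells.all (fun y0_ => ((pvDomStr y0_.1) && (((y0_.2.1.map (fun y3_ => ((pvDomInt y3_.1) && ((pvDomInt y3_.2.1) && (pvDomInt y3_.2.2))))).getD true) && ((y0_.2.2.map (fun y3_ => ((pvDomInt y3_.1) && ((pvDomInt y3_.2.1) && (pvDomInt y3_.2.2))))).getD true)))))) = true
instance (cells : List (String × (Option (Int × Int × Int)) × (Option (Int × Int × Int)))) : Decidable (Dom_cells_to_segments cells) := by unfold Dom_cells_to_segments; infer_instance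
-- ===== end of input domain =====

-- B builds the segment list back-to-front (reverse walk merging into the output list's
-- adjacent segment, then a staged reverse+filter pass) instead of A's forward
-- cur_text/cur_fg/cur_bg state machine (alternative; same cost). Both Pythons pop
-- trailing dark blanks off the ARGUMENT in place; the equivalence proved here is about
-- the return value (the mutation is identical in both).

-- shared helpers: both Python files contain the identical rgb_to_hex / is_dark and the
-- identical trailing-strip loop, so their ports share these transliterations.
def pvHexDigit (n : Nat) : Char :=
  if n < 10 then Char.ofNat (48 + n) else Char.ofNat (55 + n)

-- big-endian hex digits of n (n > 0), via fuel-bounded division loop (exact: n < 16^n)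
def pvHexRev : Nat → Nat → List Char
  | 0, _ => []
  | fuel + 1, n => if n = 0 then [] else pvHexDigit (n % 16) :: pvHexRev fuel (n / 16)

-- Python f"{n:02X}": uppercase hex, zero-padded to total width 2 (sign included)
def pvHex02X (n : Int) : List Char :=
  if n < 0 then '-' :: (pvHexRev n.natAbs n.natAbs).reverse
  else
    let d := if n = 0 then ['0'] else (pvHexRev n.natAbs n.natAbs).reverse
    if d.length < 2 then '0' :: d else d

-- rgb_to_hex on a non-None tuple (the None case is handled at each call site's guard)
def rgbToHex (v : Int × Int × Int) : String :=
  String.ofList ('#' :: (pvHex02X v.1 ++ pvHex02X v.2.1 ++ pvHex02X v.2.2))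

-- `rgb_to_hex(c) if c and sum(c) >= 40 else None` (a present 3-tuple is always truthy)
def normColor (o : Option (Int × Int × Int)) : Option String :=
  match o with
  | none => none
  | some v => if v.1 + v.2.1 + v.2.2 ≥ 40 then some (rgbToHex v) else none

def isDark (o : Option (Int × Int × Int)) : Bool :=
  match o with
  | none => true
  | some v => v.1 + v.2.1 + v.2.2 < 40

-- `while cells and cells[-1][0] == " " and is_dark(..1..) and is_dark(..2..): cells.pop()`
def stripTrailing (cells : List (String × (Option (Int × Int × Int)) × (Option (Int × Int × Int)))) :
    List (String × (Option (Int × Int × Int)) × (Option (Int × Int × Int))) :=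
  (cells.reverse.dropWhile (fun c => decide (c.1 = " ") && isDark c.2.1 && isDark c.2.2)).reverse

-- ===== PORT A =====
-- the for-loop over state (segments, cur_text, cur_fg, cur_bg); the trailing
-- `if cur_text: segments.append(...)` is the base case
def loopA : List (String × (Option (Int × Int × Int)) × (Option (Int × Int × Int))) →
    List (String × Option String × Option String) → List Char → Option String → Option String →
    List (String × Option String × Option String)
  | [], segs, cur, fg, bg => if cur ≠ [] then segs ++ [(String.ofList cur, fg, bg)] else segs
  | c :: rest, segs, cur, fg, bg =>
      let fgHex := normColor c.2.1
      let bgHex := normColor c.2.2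
      if fgHex = fg ∧ bgHex = bg then
        loopA rest segs (cur ++ c.1.toList) fg bg
      else
        loopA rest (if cur ≠ [] then segs ++ [(String.ofList cur, fg, bg)] else segs)
          c.1.toList fgHex bgHex

def cells_to_segments (cells : List (String × (Option (Int × Int × Int)) × (Option (Int × Int × Int)))) : List (String × Option String × Option String) :=
  if cells = [] then []
  else loopA (stripTrailing cells) [] [] none none

-- ===== PORT B =====
-- `k = (..., ...)` inside B's loop
def keyB (c : String × (Option (Int × Int × Int)) × (Option (Int × Int × Int))) :
    Option String × Option String :=
  (normColor c.2.1, normColor c.2.2)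

-- one iteration of B's `for ch, fg, bg in reversed(cells)` loop: merge the cell into
-- rev's last segment when the colors match, else append a fresh segment
def stepB (rev : List (List Char × Option String × Option String))
    (c : String × (Option (Int × Int × Int)) × (Option (Int × Int × Int))) :
    List (List Char × Option String × Option String) :=
  let k := keyB c
  match rev.getLast? with
  | some (t, f, b) =>
      if (f, b) = k then rev.dropLast ++ [(c.1.toList ++ t, k.1, k.2)]
      else rev ++ [(c.1.toList, k.1, k.2)]
  | none => rev ++ [(c.1.toList, k.1, k.2)]

def cells_to_segments_alt (cells : List (String × (Option (Int × Int × Int)) × (Option (Int × Int × Int)))) : List (String × Option String × Option String) :=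
  let s := stripTrailing cells
  let rev := s.reverse.foldl stepB []
  -- `[s for s in reversed(rev) if s[0]]`
  rev.reverse.filterMap (fun t => if t.1 = [] then none else some (String.ofList t.1, t.2.1, t.2.2))

-- ===== PRECONDITION & SPEC =====
def Spec_cells_to_segments (cells : List (String × (Option (Int × Int × Int)) × (Option (Int × Int × Int)))) (out : List (String × Option String × Option String)) : Prop := out = cells_to_segments_alt cells
instance (cells : List (String × (Option (Int × Int × Int)) × (Option (Int × Int × Int)))) (out : List (String × Option String × Option String)) : Decidable (Spec_cells_to_segments cells out) := by unfold Spec_cells_to_segments; infer_instance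

-- ===== CLAIM (what is proved, stated in full; the proofs are below) =====
def Claim_equal_cells_to_segments : Prop := ∀ (cells : List (String × (Option (Int × Int × Int)) × (Option (Int × Int × Int)))), Dom_cells_to_segments cells → Spec_cells_to_segments cells (cells_to_segments cells)

-- ===== LEMMAS AND PROOFS =====

-- proof-side canonical form: merging a text/key at the FRONT of a segment list
def consMerge (t : List Char) (k : Option String × Option String) :
    List (List Char × Option String × Option String) →
    List (List Char × Option String × Option String)
  | [] => [(t, k.1, k.2)]
  | (t', f, b) :: tl =>
      if (f, b) = k then (t ++ t', k.1, k.2) :: tl else (t, k.1, k.2) :: (t', f, b) :: tl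

-- proof-side: B's segments in forward order as a structural recursion (foldr view of B's loop)
def mergeB : List (String × (Option (Int × Int × Int)) × (Option (Int × Int × Int))) →
    List (List Char × Option String × Option String)
  | [] => []
  | c :: rest => consMerge c.1.toList (keyB c) (mergeB rest)

-- proof-side: the final filter pass
def filtB (l : List (List Char × Option String × Option String)) :
    List (String × Option String × Option String) :=
  l.filterMap (fun t => if t.1 = [] then none else some (String.ofList t.1, t.2.1, t.2.2))

-- proof-side: A's run grouping as a forward recursion on the open group (acc, k)
def groupsA : Option String × Option String → List Char →
    List (String × (Option (Int × Int × Int)) × (Option (Int × Int × Int))) →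
    List (String × Option String × Option String)
  | k, acc, [] => if acc = [] then [] else [(String.ofList acc, k.1, k.2)]
  | k, acc, c :: rest =>
      if keyB c = k then groupsA k (acc ++ c.1.toList) rest
      else (if acc = [] then [] else [(String.ofList acc, k.1, k.2)]) ++ groupsA (keyB c) c.1.toList rest

theorem loopA_eq_groupsA (l : List (String × (Option (Int × Int × Int)) × (Option (Int × Int × Int))))
    : ∀ (segs : List (String × Option String × Option String)) (cur : List Char)
      (fg bg : Option String),
      loopA l segs cur fg bg = segs ++ groupsA (fg, bg) cur l := by
  induction l with
  | nil =>
      intro segs cur fg bg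
      simp only [loopA, groupsA]
      by_cases h : cur = [] <;> simp [h]
  | cons c rest ih =>
      intro segs cur fg bg
      simp only [loopA, groupsA]
      by_cases h : normColor c.2.1 = fg ∧ normColor c.2.2 = bg
      · have hk : keyB c = (fg, bg) := by simp [keyB, h.1, h.2]
        simp [h, hk, ih]
      · have hk : ¬ keyB c = (fg, bg) := by
          simp only [keyB, Prod.mk.injEq]; exact h
        simp only [if_neg h, if_neg hk, ih]
        by_cases hc : cur = [] <;> simp [hc, List.append_assoc, keyB]

-- the head key of a consMerge result is k
theorem consMerge_head_key (t : List Char) (k : Option String × Option String)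
    (l : List (List Char × Option String × Option String)) :
    ∃ t' tl, consMerge t k l = (t', k.1, k.2) :: tl := by
  cases l with
  | nil => exact ⟨t, [], rfl⟩
  | cons h tl =>
      obtain ⟨t', f, b⟩ := h
      by_cases hk : (f, b) = k
      · exact ⟨t ++ t', tl, by simp [consMerge, hk]⟩
      · exact ⟨t, (t', f, b) :: tl, by simp [consMerge, hk]⟩

theorem consMerge_consMerge (a b : List Char) (k : Option String × Option String)
    (l : List (List Char × Option String × Option String)) :
    consMerge a k (consMerge b k l) = consMerge (a ++ b) k l := by
  cases l with
  | nil => simp [consMerge]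
  | cons h tl =>
      obtain ⟨t', f, bb⟩ := h
      by_cases hk : (f, bb) = k <;> simp [consMerge, hk]

-- A's grouping equals the filtered front-merge form, seeded with the open group
theorem groupsA_eq_filt (l : List (String × (Option (Int × Int × Int)) × (Option (Int × Int × Int))))
    : ∀ (k : Option String × Option String) (acc : List Char),
      groupsA k acc l = filtB (consMerge acc k (mergeB l)) := by
  induction l with
  | nil =>
      intro k acc
      simp only [groupsA, mergeB, consMerge, filtB, List.filterMap]
      by_cases h : acc = [] <;> simp [h]
  | cons c rest ih =>
      intro k acc
      simp only [groupsA, mergeB]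
      by_cases hk : keyB c = k
      · rw [if_pos hk, ih, hk, consMerge_consMerge]
      · rw [if_neg hk, ih]
        obtain ⟨t', tl, he⟩ := consMerge_head_key c.1.toList (keyB c) (mergeB rest)
        rw [he]
        have : consMerge acc k ((t', (keyB c).1, (keyB c).2) :: tl)
            = (acc, k.1, k.2) :: (t', (keyB c).1, (keyB c).2) :: tl := by
          have hne : ¬ (((keyB c).1, (keyB c).2) = k) := by simpa using hk
          simp [consMerge, hne]
        rw [this]
        by_cases h : acc = [] <;> simp [filtB, h]

-- one reversed-loop iteration, seen on the reversed accumulator, is a front merge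
theorem stepB_reverse (b : List (List Char × Option String × Option String))
    (c : String × (Option (Int × Int × Int)) × (Option (Int × Int × Int))) :
    (stepB b.reverse c).reverse = consMerge c.1.toList (keyB c) b := by
  cases b with
  | nil => simp [stepB, consMerge]
  | cons h tl =>
      obtain ⟨t', f, bb⟩ := h
      by_cases hk : (f, bb) = keyB c
      · simp [stepB, consMerge, hk]
      · simp [stepB, consMerge, hk]

-- B's foldl over the reversed cells, reversed back, is the structural front-merge list
theorem foldl_stepB_reverse (l : List (String × (Option (Int × Int × Int)) × (Option (Int × Int × Int)))) :
    (l.reverse.foldl stepB []).reverse = mergeB l := by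
  induction l with
  | nil => simp [mergeB]
  | cons c rest ih =>
      have : (c :: rest).reverse = rest.reverse ++ [c] := by simp
      rw [this, List.foldl_append]
      simp only [List.foldl_cons, List.foldl_nil, mergeB]
      rw [← ih, ← stepB_reverse]
      congr 1
      simp

-- merging an empty open group at the front disappears after filtering
theorem filt_consMerge_nil (k : Option String × Option String)
    (l : List (List Char × Option String × Option String)) :
    filtB (consMerge [] k l) = filtB l := by
  cases l with
  | nil => simp [consMerge, filtB]
  | cons h tl =>
      obtain ⟨t', f, b⟩ := h
      by_cases hk : (f, b) = k
      · rcases hk with rfl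
        simp [consMerge, filtB]
      · simp [consMerge, hk, filtB]

-- ===== VERDICT (by name: the statement is the Claim_ definition above) =====
theorem cells_to_segments_spec : Claim_equal_cells_to_segments := by
  intro cells _
  unfold Spec_cells_to_segments cells_to_segments cells_to_segments_alt
  by_cases h : cells = []
  · simp [h, stripTrailing]
  · rw [if_neg h, loopA_eq_groupsA, List.nil_append, groupsA_eq_filt,
      filt_consMerge_nil]
    show filtB (mergeB (stripTrailing cells)) = _
    rw [← foldl_stepB_reverse]
    rfl
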